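-- pv_equiv track=rewrite | github.com/dev-amit-kumar/DSA | my-folder/problems/find_valid_matrix_given_row_and_column_sums/solution.py | restoreMatrix
-- ===== SOURCE A (Python) =====
-- from typing import List
--
-- def restoreMatrix(rowSum: List[int], colSum: List[int]) -> List[List[int]]:
--     matrix = [([0]* len(colSum)) for i in range(len(rowSum))]
--     i = 0
--     j = 0
--     r = len(rowSum)
--     c = len(colSum)
--     while(i < r and j < c):
--         val = min(rowSum[i], colSum[j])
--         matrix[i][j] = val
--         rowSum[i] -= val
--         colSum[j] -= val
--         if(rowSum[i] == 0):
--             i += 1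
--         else:
--             j += 1
--     return matrix
-- ===== SOURCE B (Python) =====
-- from typing import List
--
-- def restoreMatrix(rowSum: List[int], colSum: List[int]) -> List[List[int]]:
--     # Pure structural recursion on the two lists: peel off the head row/column
--     # residual, emit min(r, c) for the corner cell, and build the answer by
--     # consing (a finished row, or a zero column prepended to the sub-answer).
--     # No indices, no preallocated matrix; does not mutate its arguments
--     # (A mutates rowSum/colSum in place; the equivalence is about the return value).
--     def go(rows: List[int], cols: List[int]) -> List[List[int]]:
--         if not rows:
--             return []
--         if not cols:
--             return [[] for _ in rows]
--         r, c = rows[0], cols[0]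
--         v = min(r, c)
--         if r - v == 0:
--             # this row is finished: pad it with zeros, recurse on remaining rows
--             sub = go(rows[1:], [c - v] + cols[1:])
--             return [[v] + [0] * (len(cols) - 1)] + sub
--         else:
--             # this column is finished: recurse on remaining columns,
--             # then prepend the corner to the first row and a zero to the others
--             sub = go([r - v] + rows[1:], cols[1:])
--             return [[v] + sub[0]] + [[0] + row for row in sub[1:]]
--     return go(rowSum, colSum)
-- ===== Notes on version B (the rewrite author's own statement) =====
-- stated objective: alternative
-- what changed: B replaces A's imperative two-pointer index walk over a preallocated r-by-c matrix (mutating rowSum/colSum and single cells in place) by a pure structural recursion on the two lists: peel the head row/column residual, emit the corner cell, and build the output by consing a finished zero-padded row or prepending a zero column to the recursively built sub-matrix; same greedy recurrence, entirely different decomposition (no indices, no mutation, no preallocation), exactly equal on all inputs.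
import Mathlib
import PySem

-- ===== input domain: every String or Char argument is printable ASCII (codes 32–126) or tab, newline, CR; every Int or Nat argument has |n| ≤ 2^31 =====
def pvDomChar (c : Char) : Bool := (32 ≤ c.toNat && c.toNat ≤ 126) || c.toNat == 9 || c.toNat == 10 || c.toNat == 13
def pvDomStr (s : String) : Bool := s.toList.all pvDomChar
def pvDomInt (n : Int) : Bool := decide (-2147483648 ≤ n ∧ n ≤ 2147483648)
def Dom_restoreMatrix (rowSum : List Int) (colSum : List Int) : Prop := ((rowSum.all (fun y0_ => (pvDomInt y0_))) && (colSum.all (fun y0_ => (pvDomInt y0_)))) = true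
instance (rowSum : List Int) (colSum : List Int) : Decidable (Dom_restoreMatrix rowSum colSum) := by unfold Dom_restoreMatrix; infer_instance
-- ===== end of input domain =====

-- B rebuilds the matrix by pure structural recursion on the two lists (consing a
-- finished zero-padded row, or prepending a zero column to the sub-answer) instead
-- of A's two-pointer index walk over a preallocated matrix; A mutates rowSum/colSum
-- in place and B does not — the equivalence proved is about the return value only.

-- ===== PORT A =====
-- A's while loop over (i, j, matrix, rowSum, colSum); every index read is in range
-- when read (guarded by the loop condition), so getD is exact there.  The explicit
-- fuel only makes the loop structural: every iteration advances i or j, so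
-- rs.length + cs.length iterations always reach the loop's own exit condition.
def restoreMatrixLoop (fuel : Nat) (i j : Nat) (m : List (List Int)) (rs cs : List Int) : List (List Int) :=
  match fuel with
  | 0 => m
  | fuel + 1 =>
    if i < rs.length ∧ j < cs.length then
      let v := min (rs.getD i 0) (cs.getD j 0)
      let m' := m.set i ((m.getD i []).set j v)
      let rs' := rs.set i (rs.getD i 0 - v)
      let cs' := cs.set j (cs.getD j 0 - v)
      if rs'.getD i 0 = 0 then restoreMatrixLoop fuel (i+1) j m' rs' cs'
      else restoreMatrixLoop fuel i (j+1) m' rs' cs'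
    else m

def restoreMatrix (rowSum : List Int) (colSum : List Int) : List (List Int) :=
  let matrix := (List.range rowSum.length).map (fun _ => List.replicate colSum.length (0 : Int))
  restoreMatrixLoop (rowSum.length + colSum.length) 0 0 matrix rowSum colSum

-- ===== PORT B =====
-- B's recursive helper go(rows, cols): corner cell v = min of the two head
-- residuals; if the row is finished, cons the zero-padded row onto the recursion
-- over the remaining rows; else recurse over the remaining columns and prepend the
-- corner to the first row and a zero to the others.
def altGo (rows cols : List Int) : List (List Int) :=
  match rows, cols with
  | [], _ => []
  | _ :: _, [] => rows.map (fun _ => [])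
  | r :: rest, c :: cs =>
    let v := min r c
    if r - v = 0 then
      (v :: List.replicate cs.length 0) :: altGo rest ((c - v) :: cs)
    else
      match altGo ((r - v) :: rest) cs with
      | [] => []          -- unreachable: altGo on nonempty rows is nonempty
      | s0 :: srest => (v :: s0) :: srest.map (fun row => 0 :: row)
termination_by rows.length + cols.length
decreasing_by
  · simp only [List.length_cons]; omega
  · simp only [List.length_cons]; omega

def restoreMatrix_alt (rowSum : List Int) (colSum : List Int) : List (List Int) :=
  altGo rowSum colSum

-- ===== PRECONDITION & SPEC =====
def Spec_restoreMatrix (rowSum : List Int) (colSum : List Int) (out : List (List Int)) : Prop := out = restoreMatrix_alt rowSum colSum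
instance (rowSum : List Int) (colSum : List Int) (out : List (List Int)) : Decidable (Spec_restoreMatrix rowSum colSum out) := by unfold Spec_restoreMatrix; infer_instance

-- ===== CLAIM (what is proved, stated in full; the proofs are below) =====
def Claim_equal_restoreMatrix : Prop := ∀ (rowSum : List Int) (colSum : List Int), Dom_restoreMatrix rowSum colSum → Spec_restoreMatrix rowSum colSum (restoreMatrix rowSum colSum)

-- ===== LEMMAS AND PROOFS =====

-- Row-by-row reading of A's walk (proof helper): the two-pointer inner sweep of one
-- row, starting at column j, on indexed lists.
def tpInner (c : Nat) (r : Int) (j : Nat) (cols row : List Int) : Nat × List Int × List Int :=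
  if _h : j < c then
    let v := min r (cols.getD j 0)
    let row' := row.set j v
    let r' := r - v
    let cols' := cols.set j (cols.getD j 0 - v)
    if r' = 0 then (j, cols', row')
    else tpInner c r' (j+1) cols' row'
  else (j, cols, row)
termination_by c - j

-- A's walk grouped into rows.
def bGo (c : Nat) (rows : List Int) (j : Nat) (cols : List Int) : List (List Int) :=
  match rows with
  | [] => []
  | r :: rest =>
    let s := tpInner c r j cols (List.replicate c 0)
    s.2.2 :: bGo c rest s.1 s.2.1

-- bGo with an arbitrary partially filled first row and first residual:
-- a mid-row state of A's walk (proof helper).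
def bGoFrom (c : Nat) (r0 : Int) (rest : List Int) (j : Nat) (cols row : List Int) : List (List Int) :=
  let s := tpInner c r0 j cols row
  s.2.2 :: bGo c rest s.1 s.2.1

-- Once the column frontier is exhausted, the walk produces only zero rows.
theorem bGo_of_le (c : Nat) (rows : List Int) (j : Nat) (cols : List Int) (h : c ≤ j) :
    bGo c rows j cols = rows.map (fun _ => List.replicate c (0 : Int)) := by
  induction rows generalizing j cols with
  | nil => simp [bGo]
  | cons r rest ih =>
      rw [bGo, tpInner]
      simp only [dif_neg (by omega : ¬ j < c)]
      simp [ih j cols h]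

-- Main invariant: from any state of A's walk in which all rows strictly below row i
-- are still all-zero, the rest of the walk produces exactly the row-by-row reading,
-- started with row i's current contents and residual.
theorem restoreMatrixLoop_eq_bGoFrom :
    ∀ (n i j : Nat) (m : List (List Int)) (rs cs : List Int),
      (rs.length - i) + (cs.length - j) ≤ n →
      m.length = rs.length →
      (∀ k, i < k → k < m.length → m.getD k [] = List.replicate cs.length 0) →
      restoreMatrixLoop n i j m rs cs =
        (if i < rs.length then
          m.take i ++ bGoFrom cs.length (rs.getD i 0) (rs.drop (i+1)) j cs (m.getD i [])
        else m) := by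
  intro n
  induction n with
  | zero =>
    intro i j m rs cs hn hm hz
    rw [restoreMatrixLoop, if_neg (by omega)]
  | succ n ih =>
    intro i j m rs cs hn hm hz
    by_cases hi : i < rs.length
    case neg => rw [restoreMatrixLoop, if_neg (by omega : ¬ (i < rs.length ∧ j < cs.length)), if_neg hi]
    rw [if_pos hi]
    have hi' : i < m.length := by omega
    by_cases hj : j < cs.length
    case neg =>
      rw [restoreMatrixLoop, if_neg (by omega : ¬ (i < rs.length ∧ j < cs.length))]
      rw [bGoFrom, tpInner]
      simp only [dif_neg hj]
      rw [bGo_of_le _ _ _ _ (by omega)]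
      have hdrop : m.drop (i+1) = (rs.drop (i+1)).map (fun _ => List.replicate cs.length (0 : Int)) := by
        have h1 : (rs.drop (i+1)).map (fun _ => List.replicate cs.length (0 : Int))
            = List.replicate (rs.length - (i+1)) (List.replicate cs.length (0 : Int)) := by
          simp [List.map_const']
        rw [h1, List.eq_replicate_iff]
        constructor
        · simp [hm]
        · intro b hb
          obtain ⟨k, hk, hbk⟩ := List.mem_iff_getElem.mp hb
          rw [List.getElem_drop] at hbk
          have hkm : i + 1 + k < m.length := by simp [List.length_drop] at hk; omega
          have := hz (i+1+k) (by omega) hkm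
          rw [List.getD_eq_getElem _ _ hkm] at this
          rw [← hbk]; exact this
      rw [List.getD_eq_getElem _ _ hi', ← hdrop, List.getElem_cons_drop hi', List.take_append_drop]
    case pos =>
      rw [restoreMatrixLoop, if_pos ⟨hi, hj⟩]
      dsimp only
      have hrsD : (rs.set i (rs.getD i 0 - min (rs.getD i 0) (cs.getD j 0))).getD i 0
          = rs.getD i 0 - min (rs.getD i 0) (cs.getD j 0) := by
        rw [List.getD_eq_getElem?_getD, List.getElem?_set_self hi]; rfl
      rw [hrsD]
      rw [bGoFrom, tpInner]
      simp only [dif_pos hj]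
      by_cases hr0 : rs.getD i 0 - min (rs.getD i 0) (cs.getD j 0) = 0
      · rw [if_pos hr0, if_pos hr0]
        rw [ih (i+1) j _ _ _ (by simp only [List.length_set]; omega)
              (by simp only [List.length_set]; omega)
              (by
                intro k hk hkm
                simp only [List.length_set] at hkm
                rw [List.getD_eq_getElem?_getD, List.getElem?_set_ne (by omega), List.length_set,
                  ← List.getD_eq_getElem?_getD]
                exact hz k (by omega) hkm)]
        simp only [List.length_set]
        by_cases hi1 : i + 1 < rs.length
        · rw [if_pos hi1]
          have hm'take : (m.set i ((m.getD i []).set j (min (rs.getD i 0) (cs.getD j 0)))).take (i+1)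
              = m.take i ++ [(m.getD i []).set j (min (rs.getD i 0) (cs.getD j 0))] := by
            have hlen : (List.take i m).length = i := by rw [List.length_take]; omega
            rw [List.take_set, List.take_add_one, List.getElem?_eq_getElem hi',
              Option.toList_some, List.set_append, if_neg (by rw [hlen]; omega), hlen,
              Nat.sub_self, List.set_cons_zero]
          rw [hm'take]
          have hgd1 : (m.set i ((m.getD i []).set j (min (rs.getD i 0) (cs.getD j 0)))).getD (i+1) []
              = List.replicate cs.length 0 := by
            rw [List.getD_eq_getElem?_getD, List.getElem?_set_ne (by omega),
              ← List.getD_eq_getElem?_getD]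
            exact hz (i+1) (by omega) (by omega)
          rw [hgd1]
          have hrsget : (rs.set i (rs.getD i 0 - min (rs.getD i 0) (cs.getD j 0))).getD (i+1) 0
              = rs.getD (i+1) 0 := by
            rw [List.getD_eq_getElem?_getD, List.getElem?_set_ne (by omega),
              ← List.getD_eq_getElem?_getD]
          rw [hrsget]
          have hrsdrop : (rs.set i (rs.getD i 0 - min (rs.getD i 0) (cs.getD j 0))).drop (i+2)
              = rs.drop (i+2) := by
            rw [List.drop_set, if_pos (by omega)]
          rw [hrsdrop]
          have hcons : rs.drop (i+1) = rs.getD (i+1) 0 :: rs.drop (i+2) := by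
            rw [List.getD_eq_getElem _ _ hi1, List.getElem_cons_drop hi1]
          rw [hcons, bGo, bGoFrom]
          simp
        · rw [if_neg hi1]
          rw [List.drop_eq_nil_of_le (by omega : rs.length ≤ i + 1), bGo]
          rw [List.set_eq_take_cons_drop _ hi', List.drop_eq_nil_of_le (by omega : m.length ≤ i + 1)]
      · rw [if_neg hr0, if_neg hr0]
        rw [ih i (j+1) _ _ _ (by simp only [List.length_set]; omega)
              (by simp only [List.length_set]; omega)
              (by
                intro k hk hkm
                simp only [List.length_set] at hkm ⊢
                rw [List.getD_eq_getElem?_getD, List.getElem?_set_ne (by omega),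
                  ← List.getD_eq_getElem?_getD]
                exact hz k hk hkm)]
        rw [if_pos (by simp only [List.length_set]; omega)]
        rw [List.take_set, List.set_eq_of_length_le (List.length_take_le i m)]
        rw [bGoFrom, hrsD]
        have hrsdrop : (rs.set i (rs.getD i 0 - min (rs.getD i 0) (cs.getD j 0))).drop (i+1)
            = rs.drop (i+1) := by
          rw [List.drop_set, if_pos (by omega)]
        rw [hrsdrop]
        have hmget : (m.set i ((m.getD i []).set j (min (rs.getD i 0) (cs.getD j 0)))).getD i []
            = (m.getD i []).set j (min (rs.getD i 0) (cs.getD j 0)) := by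
          rw [List.getD_eq_getElem?_getD, List.getElem?_set_self hi']; rfl
        rw [hmget]
        simp only [List.length_set]

theorem restoreMatrix_eq_bGo (rowSum colSum : List Int) :
    restoreMatrix rowSum colSum = bGo colSum.length rowSum 0 colSum := by
  rw [restoreMatrix]
  rw [restoreMatrixLoop_eq_bGoFrom (rowSum.length + colSum.length) 0 0 _ _ _
        (by omega) (by simp) ?hz]
  case hz =>
    intro k _ hk
    simp only [List.length_map, List.length_range] at hk
    rw [List.getD_eq_getElem _ _ (by simpa using hk)]
    simp
  cases rowSum with
  | nil => simp [bGo]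
  | cons r0 rest =>
    rw [if_pos (by simp)]
    rw [bGo, bGoFrom]
    simp

theorem altGo_nil_cols (rows : List Int) : altGo rows [] = rows.map (fun _ => []) := by
  cases rows <;> simp [altGo]

-- The two-pointer inner sweep of one row, started at the frontier of a column
-- prefix of length zs.length, computes the head row of B's recursion on the column
-- suffix, and leaves a state (new frontier, column residuals) on which B's
-- recursion describes the remaining rows (with the consumed columns as a zero
-- prefix of each row).
theorem tpInner_stair :
    ∀ (tail zs rowpre : List Int) (r : Int),
      rowpre.length = zs.length →
      ∃ (zs' tail' s0 : List Int),
        tpInner (zs.length + tail.length) r zs.length (zs ++ tail)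
            (rowpre ++ List.replicate tail.length 0)
          = (zs'.length, zs' ++ tail', rowpre ++ s0) ∧
        (∀ rest : List Int, altGo (r :: rest) tail
          = s0 :: (altGo rest tail').map
              (fun row => List.replicate (zs'.length - zs.length) 0 ++ row)) ∧
        zs.length ≤ zs'.length ∧
        zs'.length + tail'.length = zs.length + tail.length := by
  intro tail
  induction tail with
  | nil =>
    intro zs rowpre r hlen
    refine ⟨zs, [], [], ?_, ?_, le_refl _, by simp⟩
    · rw [tpInner, dif_neg (by simp)]
      simp
    · intro rest
      rw [altGo, altGo_nil_cols]
      simp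
  | cons t ts ih =>
    intro zs rowpre r hlen
    have hgd : (zs ++ t :: ts).getD zs.length 0 = t := by
      rw [List.getD_eq_getElem?_getD, List.getElem?_append_right (le_refl _)]
      simp
    have hsetc : (zs ++ t :: ts).set zs.length (t - min r t)
        = zs ++ (t - min r t) :: ts := by
      rw [List.set_append, if_neg (by omega)]
      simp
    have hsetr : (rowpre ++ List.replicate (t :: ts).length 0).set zs.length (min r t)
        = rowpre ++ min r t :: List.replicate ts.length 0 := by
      rw [List.set_append, if_neg (by omega), hlen]
      simp [List.replicate_succ]
    rw [tpInner, dif_pos (by simp only [List.length_cons]; omega)]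
    simp only [hgd, hsetc, hsetr]
    by_cases hr0 : r - min r t = 0
    · rw [if_pos hr0]
      refine ⟨zs, (t - min r t) :: ts, min r t :: List.replicate ts.length 0, rfl, ?_, le_refl _, by simp⟩
      intro rest
      rw [altGo]
      simp [hr0]
    · rw [if_neg hr0]
      have hvt : min r t = t := by
        rcases min_choice r t with h | h
        · exfalso; apply hr0; omega
        · exact h
      obtain ⟨zs', tail', s0', h1, h2, h3, h4⟩ :=
        ih (zs ++ [0]) (rowpre ++ [min r t]) (r - min r t) (by simp [hlen])
      have e1 : zs ++ (t - min r t) :: ts = (zs ++ [0]) ++ ts := by simp [hvt]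
      have e2 : rowpre ++ min r t :: List.replicate ts.length 0
          = (rowpre ++ [min r t]) ++ List.replicate ts.length 0 := by simp
      have e3 : zs.length + (t :: ts).length = (zs ++ [0]).length + ts.length := by
        simp; omega
      have e4 : zs.length + 1 = (zs ++ [0]).length := by simp
      refine ⟨zs', tail', min r t :: s0', ?_, ?_, by simp at h3; omega, ?_⟩
      · rw [e1, e2, e3, e4, h1]
        simp
      · intro rest
        rw [altGo]
        simp only [if_neg hr0]
        rw [h2 rest]
        simp only [List.map_map]
        have hk : zs'.length - zs.length = (zs'.length - (zs ++ [0]).length) + 1 := by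
          simp at h3 ⊢; omega
        rw [hk]
        congr 1
      · simp at h4; omega

-- A's row-grouped walk, at a frontier with zs.length consumed columns, is B's
-- recursion on the remaining columns with the consumed columns as zero prefixes.
theorem bGo_eq_altGo :
    ∀ (rows zs tail : List Int),
      bGo (zs.length + tail.length) rows zs.length (zs ++ tail)
        = (altGo rows tail).map (fun row => List.replicate zs.length 0 ++ row) := by
  intro rows
  induction rows with
  | nil => intro zs tail; rw [altGo]; rfl
  | cons r rest ih =>
    intro zs tail
    obtain ⟨zs', tail', s0, h1, h2, h3, h4⟩ :=
      tpInner_stair tail zs (List.replicate zs.length 0) r (by simp)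
    have hrepl : List.replicate (zs.length + tail.length) (0 : Int)
        = List.replicate zs.length 0 ++ List.replicate tail.length 0 := by
      rw [← List.replicate_append_replicate]
    rw [bGo, hrepl]
    simp only [h1]
    have := ih zs' tail'
    rw [h4] at this
    rw [this, h2 rest]
    simp only [List.map_cons, List.map_map]
    congr 1
    apply List.map_congr_left
    intro row _
    have : List.replicate zs.length (0 : Int) ++ List.replicate (zs'.length - zs.length) 0
        = List.replicate zs'.length 0 := by
      rw [List.replicate_append_replicate]
      congr 1
      omega
    simp [Function.comp, ← List.append_assoc, this]

-- ===== VERDICT (by name: the statement is the Claim_ definition above) =====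
theorem restoreMatrix_spec : Claim_equal_restoreMatrix := by
  intro rowSum colSum _
  unfold Spec_restoreMatrix restoreMatrix_alt
  rw [restoreMatrix_eq_bGo]
  have := bGo_eq_altGo rowSum [] colSum
  simpa using this
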